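-- pv_equiv track=rewrite | github.com/VladimirSafronov/Python | HelloPython/NewExercises/036.py | higher
-- ===== SOURCE A (Python) =====
-- def higher(li):
--     max = li[0]
--     new_list = [max]
--     for i in li:
--         if i > max:
--             new_list.append(i)
--             max = i
--     return new_list
-- ===== SOURCE B (Python) =====
-- def higher(li):
--     # Pass 1: build the running-maximum array rm (same length as li).
--     rm = []
--     m = li[0]
--     for x in li:
--         if x > m:
--             m = x
--         rm.append(m)
--     # Pass 2: collect rm[0] and every change point of rm.
--     out = [rm[0]]
--     prev = rm[0]
--     for v in rm[1:]:
--         if v > prev: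
--             out.append(v)
--         prev = v
--     return out
-- ===== Notes on version B (the rewrite author's own statement) =====
-- stated objective: alternative
-- what changed: Splits A's single fused scan into two passes: first build the full running-maximum array, then collect its strict change points; A instead appends elements in one loop while updating the maximum in place.
import Mathlib
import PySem

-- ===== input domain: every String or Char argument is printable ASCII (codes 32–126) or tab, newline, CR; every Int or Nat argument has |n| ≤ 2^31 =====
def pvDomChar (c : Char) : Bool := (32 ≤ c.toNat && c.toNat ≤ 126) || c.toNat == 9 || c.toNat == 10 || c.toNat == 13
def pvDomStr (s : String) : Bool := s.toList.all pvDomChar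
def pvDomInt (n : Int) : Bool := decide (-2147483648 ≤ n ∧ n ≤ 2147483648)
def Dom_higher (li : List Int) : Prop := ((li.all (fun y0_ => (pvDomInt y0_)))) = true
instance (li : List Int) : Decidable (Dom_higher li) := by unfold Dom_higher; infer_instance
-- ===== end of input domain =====

-- B builds the running-maximum array first and then collects its strict change points,
-- instead of A's fused single scan; objective: alternative decomposition, same cost.


-- ===== PORT A =====
-- li[0] raises IndexError on []; the [] branch is unreachable under Pre_higher.
def higher (li : List Int) : List Int :=
  match li with
  | [] => []
  | h :: _ =>
    (li.foldl (fun (st : List Int × Int) i =>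
        if i > st.2 then (st.1 ++ [i], i) else st) ([h], h)).1

-- ===== PORT B =====
-- pass 1: build rm; pass 2: collect rm[0] and strict change points. [] unreachable under Pre_higher.
def higher_alt (li : List Int) : List Int :=
  match li with
  | [] => []
  | h :: _ =>
    let rm := (li.foldl (fun (st : List Int × Int) x =>
        let m := if x > st.2 then x else st.2
        (st.1 ++ [m], m)) ([], h)).1
    match rm with
    | [] => []
    | r0 :: rest =>
      (rest.foldl (fun (st : List Int × Int) v =>
          (if v > st.2 then st.1 ++ [v] else st.1, v)) ([r0], r0)).1

-- ===== PRECONDITION & SPEC =====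
-- Pre_ excludes only the empty list, on which A raises IndexError (li[0]).
def Pre_higher (li : List Int) : Prop := li ≠ []
instance (li : List Int) : Decidable (Pre_higher li) := by unfold Pre_higher; infer_instance
def pvWitness_higher : List Int := ([3, 1, 4, 4, 2, 5])

def Spec_higher (li : List Int) (out : List Int) : Prop := out = higher_alt li
instance (li : List Int) (out : List Int) : Decidable (Spec_higher li out) := by unfold Spec_higher; infer_instance

-- ===== CLAIM (what is proved, stated in full; the proofs are below) =====
def Claim_equal_higher : Prop := ∀ (li : List Int), Dom_higher li → Pre_higher li → Spec_higher li (higher li)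

-- ===== LEMMAS AND PROOFS =====

-- reference: the strictly increasing running-maximum elements after the head, given current max m
def pvRef (t : List Int) (m : Int) : List Int :=
  match t with
  | [] => []
  | x :: xs => if x > m then x :: pvRef xs x else pvRef xs m

-- running maxima of t continuing from m
def pvRms (t : List Int) (m : Int) : List Int :=
  match t with
  | [] => []
  | x :: xs => (if x > m then x else m) :: pvRms xs (if x > m then x else m)

theorem pvA_loop (t : List Int) (out : List Int) (m : Int) :
    (t.foldl (fun (st : List Int × Int) i =>
        if i > st.2 then (st.1 ++ [i], i) else st) (out, m)).1 = out ++ pvRef t m := by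
  induction t generalizing out m with
  | nil => simp [pvRef]
  | cons x xs ih =>
    by_cases h : x > m <;> simp [pvRef, h, ih]

theorem pvRm_loop (t : List Int) (acc : List Int) (m : Int) :
    (t.foldl (fun (st : List Int × Int) x =>
        let m' := if x > st.2 then x else st.2
        (st.1 ++ [m'], m')) (acc, m)).1 = acc ++ pvRms t m := by
  induction t generalizing acc m with
  | nil => simp [pvRms]
  | cons x xs ih => simp [pvRms, ih]

-- change-point selection over rs with current prev p
def pvSel (rs : List Int) (p : Int) : List Int :=
  match rs with
  | [] => []
  | v :: vs => (if v > p then [v] else []) ++ pvSel vs v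

theorem pvSel_loop (rs : List Int) (out : List Int) (p : Int) :
    (rs.foldl (fun (st : List Int × Int) v =>
        (if v > st.2 then st.1 ++ [v] else st.1, v)) (out, p)).1 = out ++ pvSel rs p := by
  induction rs generalizing out p with
  | nil => simp [pvSel]
  | cons v vs ih =>
    by_cases h : v > p <;> simp [pvSel, h, ih]

theorem pvSel_rms (t : List Int) (m : Int) : pvSel (pvRms t m) m = pvRef t m := by
  induction t generalizing m with
  | nil => simp [pvRms, pvSel, pvRef]
  | cons x xs ih =>
    by_cases h : x > m
    · simp [pvRms, pvSel, pvRef, h, ih]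
    · simp [pvRms, pvSel, pvRef, h, ih]

-- ===== VERDICT (by name: the statement is the Claim_ definition above) =====
theorem higher_spec : Claim_equal_higher := by
  intro li _ hpre
  unfold Spec_higher
  match li with
  | [] => exact absurd rfl hpre
  | h :: t =>
    have hA : higher (h :: t) = [h] ++ pvRef t h := by
      simp [higher, pvA_loop]
    have hrm : (((h :: t).foldl (fun (st : List Int × Int) x =>
        let m := if x > st.2 then x else st.2
        (st.1 ++ [m], m)) ([], h))).1 = h :: pvRms t h := by
      simp [pvRm_loop]
    have hB : higher_alt (h :: t) = [h] ++ pvSel (pvRms t h) h := by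
      simp only [higher_alt, hrm]
      simp [pvSel_loop]
    rw [hA, hB, pvSel_rms]
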